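-- pv_equiv track=rewrite | github.com/chenxu10/kata | playground/test_fancy_number.py | count_fancy_numbers
-- ===== SOURCE A (Python) =====
-- def count_fancy_numbers(n):
--     if n == 0:
--         return 1
--
--     count = 0
--     for i in range(n + 1):
--         div, mod = divmod(i, 4)
--
--         if div == 1 and mod == 1:
--             count += 1
--
--         if div == 1 and mod == 0:
--             count += 1
--
--         if div == 0 and mod == 1:
--             count += 1
--
--         if div == 0 and mod == 0:
--             count += 1
--
--     return count
-- ===== SOURCE B (Python) =====
-- def count_fancy_numbers(n):
--     total = 0
--     for x in (0, 1, 4, 5):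
--         if x <= n:
--             total += 1
--     return total
-- ===== Notes on version B (the rewrite author's own statement) =====
-- stated objective: faster
-- what changed: A scans every i in range(n+1) and tests divmod(i,4); B just counts how many of the four fancy numbers {0,1,4,5} are <= n, a constant-size check.
import Mathlib
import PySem

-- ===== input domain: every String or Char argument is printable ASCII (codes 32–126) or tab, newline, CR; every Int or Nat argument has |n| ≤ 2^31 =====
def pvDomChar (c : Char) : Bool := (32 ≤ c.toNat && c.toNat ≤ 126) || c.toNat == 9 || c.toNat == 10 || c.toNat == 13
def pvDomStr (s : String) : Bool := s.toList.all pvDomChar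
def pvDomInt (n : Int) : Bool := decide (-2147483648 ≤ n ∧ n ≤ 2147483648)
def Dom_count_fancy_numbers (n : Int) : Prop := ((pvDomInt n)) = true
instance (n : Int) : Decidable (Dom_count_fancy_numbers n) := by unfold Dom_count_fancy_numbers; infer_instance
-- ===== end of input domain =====

-- B replaces A's O(n) scan of range(n+1) by counting which of the four fancy numbers {0,1,4,5} are ≤ n (O(1)).

-- ===== PORT A =====
-- loop body of A: the four divmod tests, each possibly incrementing count
def pvFancyStep (count i : Int) : Int :=
  let dv := PySem.Int.floordiv i 4
  let md := PySem.Int.mod i 4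
  let count := if dv == 1 && md == 1 then count + 1 else count
  let count := if dv == 1 && md == 0 then count + 1 else count
  let count := if dv == 0 && md == 1 then count + 1 else count
  let count := if dv == 0 && md == 0 then count + 1 else count
  count

def count_fancy_numbers (n : Int) : Int :=
  if n == 0 then 1
  else (PySem.List.pyRange 0 (n + 1) 1).foldl pvFancyStep 0

-- ===== PORT B =====
def count_fancy_numbers_alt (n : Int) : Int :=
  ([0, 1, 4, 5] : List Int).foldl (fun total x => if x ≤ n then total + 1 else total) 0

-- ===== PRECONDITION & SPEC =====
def Spec_count_fancy_numbers (n : Int) (out : Int) : Prop := out = count_fancy_numbers_alt n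
instance (n : Int) (out : Int) : Decidable (Spec_count_fancy_numbers n out) := by unfold Spec_count_fancy_numbers; infer_instance

-- ===== CLAIM (what is proved, stated in full; the proofs are below) =====
def Claim_equal_count_fancy_numbers : Prop := ∀ (n : Int), Dom_count_fancy_numbers n → Spec_count_fancy_numbers n (count_fancy_numbers n)

-- ===== LEMMAS AND PROOFS =====

-- For i ≥ 6 the loop body of A leaves count unchanged.
theorem pvFancyStep_id (count i : Int) (h : 6 ≤ i) : pvFancyStep count i = count := by
  have hd : PySem.Int.floordiv i 4 = i / 4 :=
    PySem.Int.floordiv_eq_ediv_of_pos (by norm_num)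
  have hm : PySem.Int.mod i 4 = i % 4 :=
    PySem.Int.mod_eq_emod_of_pos (by norm_num)
  simp only [pvFancyStep, hd, hm, beq_iff_eq, Bool.and_eq_true]
  split_ifs <;> omega

theorem pvFancy_foldl_id (l : List Int) (acc : Int) (h : ∀ i ∈ l, 6 ≤ i) :
    l.foldl pvFancyStep acc = acc := by
  induction l generalizing acc with
  | nil => rfl
  | cons x xs ih =>
    simp only [List.foldl_cons]
    rw [pvFancyStep_id acc x (h x (List.mem_cons_self))]
    exact ih acc (fun i hi => h i (List.mem_cons_of_mem _ hi))

-- ===== VERDICT (by name: the statement is the Claim_ definition above) =====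
theorem count_fancy_numbers_spec : Claim_equal_count_fancy_numbers := by
  intro n _
  unfold Spec_count_fancy_numbers
  by_cases h0 : n = 0
  · subst h0; decide
  · by_cases hneg : n + 1 ≤ 0
    · rw [count_fancy_numbers, count_fancy_numbers_alt,
        if_neg (by simpa using h0), PySem.List.pyRange_one_eq_nil hneg]
      simp only [List.foldl_nil, List.foldl_cons]
      split_ifs <;> omega
    · by_cases hsmall : n ≤ 5
      · have h1 : 1 ≤ n := by omega
        interval_cases n <;> decide
      · rw [count_fancy_numbers, count_fancy_numbers_alt, if_neg (by simpa using h0),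
          PySem.List.pyRange_one_append 0 6 (n + 1) (by omega) (by omega),
          List.foldl_append]
        rw [pvFancy_foldl_id _ _ (fun i hi => by
          have := (PySem.List.mem_pyRange_one).mp hi; omega)]
        have h4 : (PySem.List.pyRange 0 6 1).foldl pvFancyStep 0 = 4 := by decide
        rw [h4]
        simp only [List.foldl_cons, List.foldl_nil]
        split_ifs <;> omega
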